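-- pv_equiv track=rewrite | github.com/eliwilson/TCPChatServer | server.py | channelPrompt
-- ===== SOURCE A (Python) =====
-- def channelPrompt(numChannels):
--     s = "\nEnter Channel ("
--     for i in range(numChannels):
--         if(i+1 != numChannels):
--             s += str(i+1) + ", "
--         else:
--             s += "or " + str(i+1) + "): "
--     return s
-- ===== SOURCE B (Python) =====
-- def channelPrompt(numChannels):
--     # Build the prompt BACK-TO-FRONT: start from the closing piece
--     # "or <n>): ", push "<i>, " pieces while counting i down to 1,
--     # push the header last, then reverse-join.
--     if numChannels <= 0:
--         return "\nEnter Channel ("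
--     parts = ["or " + str(numChannels) + "): "]
--     i = numChannels - 1
--     while i >= 1:
--         parts.append(str(i) + ", ")
--         i -= 1
--     parts.append("\nEnter Channel (")
--     return "".join(reversed(parts))
-- ===== Notes on version B (the rewrite author's own statement) =====
-- stated objective: alternative
-- what changed: Builds the prompt back-to-front: starts from the closing piece 'or <n>): ', pushes '<i>, ' pieces in a countdown while-loop from n-1 to 1, pushes the header last, and reverse-joins — eliminating A's forward accumulation and its per-iteration 'is this the last element?' branch.
import Mathlib
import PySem

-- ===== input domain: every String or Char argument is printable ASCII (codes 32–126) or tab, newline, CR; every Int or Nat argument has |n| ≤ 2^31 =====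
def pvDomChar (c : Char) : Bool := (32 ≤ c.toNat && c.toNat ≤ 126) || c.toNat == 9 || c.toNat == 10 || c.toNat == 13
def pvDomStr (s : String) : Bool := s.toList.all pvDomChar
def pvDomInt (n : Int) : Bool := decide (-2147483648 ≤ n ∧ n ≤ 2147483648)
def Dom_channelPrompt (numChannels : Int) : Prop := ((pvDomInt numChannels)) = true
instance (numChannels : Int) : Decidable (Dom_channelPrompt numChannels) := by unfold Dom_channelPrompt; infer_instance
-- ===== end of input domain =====

-- B builds the prompt back-to-front (countdown prepending pieces), removing A's in-loop last-element branch (objective: alternative).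

-- ===== PORT A =====
def channelPrompt (numChannels : Int) : String :=
  (PySem.List.pyRange 0 numChannels 1).foldl
    (fun s i =>
      if i + 1 ≠ numChannels then s ++ PySem.Int.toStr (i + 1) ++ ", "
      else s ++ "or " ++ PySem.Int.toStr (i + 1) ++ "): ")
    "\nEnter Channel ("

-- ===== PORT B =====
-- countdown loop: while i >= 1: parts.append(str(i) + ", "); i -= 1  (i counted as a Nat)
def pvPartsLoop : Nat → List String → List String
  | 0, ps => ps
  | i + 1, ps => pvPartsLoop i (ps ++ [PySem.Int.toStr ((i : Int) + 1) ++ ", "])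

def channelPrompt_alt (numChannels : Int) : String :=
  if numChannels ≤ 0 then "\nEnter Channel ("
  else
    let parts := pvPartsLoop (numChannels - 1).toNat
                   ["or " ++ PySem.Int.toStr numChannels ++ "): "]
    -- "".join(reversed(parts ++ [header])) = concatenation of the reversed list
    String.join (parts ++ ["\nEnter Channel ("]).reverse

-- ===== PRECONDITION & SPEC =====
def Spec_channelPrompt (numChannels : Int) (out : String) : Prop := out = channelPrompt_alt numChannels
instance (numChannels : Int) (out : String) : Decidable (Spec_channelPrompt numChannels out) := by unfold Spec_channelPrompt; infer_instance

-- ===== CLAIM (what is proved, stated in full; the proofs are below) =====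
def Claim_equal_channelPrompt : Prop := ∀ (numChannels : Int), Dom_channelPrompt numChannels → Spec_channelPrompt numChannels (channelPrompt numChannels)

-- ===== LEMMAS AND PROOFS =====

-- concat of "1, 2, ..., m, " pieces, shared normal form of both sides
def pvCore : Nat → String
  | 0 => ""
  | m + 1 => pvCore m ++ PySem.Int.toStr ((m : Int) + 1) ++ ", "

theorem pv_foldA (n : Int) :
    ∀ (m : Nat), (m : Int) ≤ n - 1 →
      (PySem.List.pyRange 0 m 1).foldl
        (fun s i =>
          if i + 1 ≠ n then s ++ PySem.Int.toStr (i + 1) ++ ", "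
          else s ++ "or " ++ PySem.Int.toStr (i + 1) ++ "): ")
        "\nEnter Channel (" = "\nEnter Channel (" ++ pvCore m := by
  intro m
  induction m with
  | zero => intro _; simp [pvCore]
  | succ m ih =>
    intro h
    have h0 : (0 : Int) ≤ (m : Int) := by positivity
    have hsplit := PySem.List.pyRange_one_succ_right (a := 0) (b := (m : Int)) h0
    have hcast : ((m : Nat) : Int) + 1 = ((m + 1 : Nat) : Int) := by push_cast; ring
    rw [← hcast] at *
    rw [hsplit, List.foldl_append, ih (by omega)]
    have hne : (m : Int) + 1 ≠ n := by omega
    simp [hne, pvCore, String.append_assoc]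

theorem pv_join_cons (a : String) (l : List String) :
    String.join (a :: l) = a ++ String.join l := by
  have h : ∀ (l : List String) (s : String), l.foldl (· ++ ·) s = s ++ l.foldl (· ++ ·) "" := by
    intro l
    induction l with
    | nil => intro s; simp
    | cons x t ih =>
      intro s
      simp only [List.foldl_cons]
      rw [ih (s ++ x), ih ("" ++ x)]
      simp [String.append_assoc]
  simp only [String.join, List.foldl_cons]
  exact h l ("" ++ a) |>.trans (by simp)

theorem pv_partsLoop (ps : List String) :
    ∀ (m : Nat), String.join (pvPartsLoop m ps).reverse = pvCore m ++ String.join ps.reverse := by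
  intro m
  induction m generalizing ps with
  | zero => simp [pvPartsLoop, pvCore]
  | succ m ih =>
    simp only [pvPartsLoop, pvCore, ih]
    rw [List.reverse_append]
    simp only [List.reverse_singleton, List.singleton_append, pv_join_cons]
    simp [String.append_assoc]

-- ===== VERDICT (by name: the statement is the Claim_ definition above) =====
theorem channelPrompt_spec : Claim_equal_channelPrompt := by
  intro n _
  unfold Spec_channelPrompt channelPrompt channelPrompt_alt
  by_cases hpos : n ≤ 0
  · simp only [hpos, if_pos]
    rw [PySem.List.pyRange_one_eq_nil (by omega)]
    simp
  · simp only [hpos, if_false]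
    have hm : (((n - 1).toNat : Int)) = n - 1 := by omega
    have hsplitA := PySem.List.pyRange_one_succ_right (a := 0) (b := n - 1) (by omega)
    have hA : n - 1 + 1 = n := by ring
    rw [hA] at hsplitA
    rw [hsplitA, List.foldl_append, ← hm, pv_foldA n (n - 1).toNat (by omega)]
    rw [hm]
    rw [List.reverse_append, List.reverse_singleton, List.singleton_append, pv_join_cons,
        pv_partsLoop]
    have hlast : (n - 1) + 1 = n := by ring
    simp only [List.foldl_cons, List.foldl_nil, hlast]
    simp [String.join, String.append_assoc]
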